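-- pv_equiv track=rewrite | github.com/yeogirlyun/enhanced-poker-strategy-system | backend/core/hands_database.py | _split_into_hand_blocks
-- ===== SOURCE A (Python) =====
-- from typing import List, Dict, Any, Optional, Set
--
-- def _split_into_hand_blocks(content: str) -> List[str]:
--     """Split PHH content into individual hand blocks."""
--     # Look for hand boundaries (typically marked by [hand.meta] or similar)
--     lines = content.split('\n')
--     blocks = []
--     current_block = []
--     in_hand = False
--
--     for line in lines:
--         stripped = line.strip()
--
--         # Start of new hand
--         if stripped.startswith('[hand.meta]') or stripped.startswith('# Hand '):
--             if current_block and in_hand: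
--                 blocks.append('\n'.join(current_block))
--             current_block = [line]
--             in_hand = True
--         elif in_hand:
--             current_block.append(line)
--             # End hand on next hand start or file end
--
--     # Add final block
--     if current_block and in_hand:
--         blocks.append('\n'.join(current_block))
--
--     return blocks
-- ===== SOURCE B (Python) =====
-- from typing import List
--
--
-- def _is_hand_start(line: str) -> bool:
--     s = line.strip()
--     return s.startswith('[hand.meta]') or s.startswith('# Hand ')
--
--
-- def _split_into_hand_blocks(content: str) -> List[str]:
--     """Split PHH content into hand blocks via a boundary-index table."""
--     lines = content.split('\n')
--     bounds = [i for i, line in enumerate(lines) if _is_hand_start(line)]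
--     ends = bounds[1:] + [len(lines)]
--     return ['\n'.join(lines[b:e]) for b, e in zip(bounds, ends)]
-- ===== Notes on version B (the rewrite author's own statement) =====
-- stated objective: alternative
-- what changed: Replaces the per-line state machine (blocks/current_block/in_hand accumulators) by a two-phase decomposition: first collect the list of boundary line indices, then slice the line list between consecutive boundaries and join each slice.
import Mathlib
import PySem

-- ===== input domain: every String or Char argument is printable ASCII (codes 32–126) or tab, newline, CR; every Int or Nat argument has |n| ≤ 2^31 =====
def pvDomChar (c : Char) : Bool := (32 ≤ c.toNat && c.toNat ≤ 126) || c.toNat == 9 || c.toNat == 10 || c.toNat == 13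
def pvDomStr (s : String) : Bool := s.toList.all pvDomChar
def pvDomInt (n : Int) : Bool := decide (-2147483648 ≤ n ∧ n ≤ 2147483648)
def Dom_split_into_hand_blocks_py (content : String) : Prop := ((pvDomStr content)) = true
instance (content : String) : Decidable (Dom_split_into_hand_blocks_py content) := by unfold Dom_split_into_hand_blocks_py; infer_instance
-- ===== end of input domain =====

-- B replaces A's per-line accumulator/in_hand state machine by a boundary-index table and slicing
-- (objective: alternative decomposition, same asymptotic cost).

-- ===== PORT A =====
-- literal transliteration: fold over the lines with state (blocks, current_block, in_hand), final flush
def split_into_hand_blocks_py (content : String) : List String :=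
  let lines := (PySem.Str.split? content "\n").getD []
  let fin := lines.foldl (fun (st : List String × List String × Bool) line =>
      let stripped := PySem.Str.strip line
      if PySem.Str.startswith stripped "[hand.meta]" || PySem.Str.startswith stripped "# Hand " then
        ((if !st.2.1.isEmpty && st.2.2 then st.1 ++ [PySem.Str.join "\n" st.2.1] else st.1),
         [line], true)
      else if st.2.2 then (st.1, st.2.1 ++ [line], st.2.2) else st)
    ([], [], false)
  if !fin.2.1.isEmpty && fin.2.2 then fin.1 ++ [PySem.Str.join "\n" fin.2.1] else fin.1

-- ===== PORT B =====
-- B-side helper: line.strip().startswith('[hand.meta]') or ...startswith('# Hand ')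
def pvIsHandStart (line : String) : Bool :=
  let s := PySem.Str.strip line
  PySem.Str.startswith s "[hand.meta]" || PySem.Str.startswith s "# Hand "

-- literal transliteration of Source B: boundary-index table, then slice between consecutive boundaries
def split_into_hand_blocks_py_alt (content : String) : List String :=
  let lines := (PySem.Str.split? content "\n").getD []
  let bounds : List Int := (PySem.List.enumerate lines 0).filterMap
      (fun p => if pvIsHandStart p.2 then some p.1 else none)
  let ends : List Int := bounds.tail ++ [(lines.length : Int)]
  (bounds.zip ends).map
      (fun be => PySem.Str.join "\n" (PySem.List.slice lines (some be.1) (some be.2)))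

-- ===== PRECONDITION & SPEC =====
def Spec_split_into_hand_blocks_py (content : String) (out : List String) : Prop := out = split_into_hand_blocks_py_alt content
instance (content : String) (out : List String) : Decidable (Spec_split_into_hand_blocks_py content out) := by unfold Spec_split_into_hand_blocks_py; infer_instance

-- ===== CLAIM (what is proved, stated in full; the proofs are below) =====
def Claim_equal_split_into_hand_blocks_py : Prop := ∀ (content : String), Dom_split_into_hand_blocks_py content → Spec_split_into_hand_blocks_py content (split_into_hand_blocks_py content)

-- ===== LEMMAS AND PROOFS =====

-- A's loop body and final flush, named for the proofs
def pvStepA (st : List String × List String × Bool) (line : String) :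
    List String × List String × Bool :=
  let stripped := PySem.Str.strip line
  if PySem.Str.startswith stripped "[hand.meta]" || PySem.Str.startswith stripped "# Hand " then
    ((if !st.2.1.isEmpty && st.2.2 then st.1 ++ [PySem.Str.join "\n" st.2.1] else st.1),
     [line], true)
  else if st.2.2 then (st.1, st.2.1 ++ [line], st.2.2) else st

def pvFinish (st : List String × List String × Bool) : List String :=
  if !st.2.1.isEmpty && st.2.2 then st.1 ++ [PySem.Str.join "\n" st.2.1] else st.1

theorem pvA_unfold (content : String) :
    split_into_hand_blocks_py content
      = pvFinish (((PySem.Str.split? content "\n").getD []).foldl pvStepA ([], [], false)) := rfl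

-- reference back-to-front grouping: (pending lines before the first boundary, blocks)
def pvGroups : List String → List String × List (List String)
  | [] => ([], [])
  | l :: ls =>
      let r := pvGroups ls
      if pvIsHandStart l then ([], (l :: r.1) :: r.2) else (l :: r.1, r.2)

-- boundary indices as naturals
def pvNB : List String → List Nat
  | [] => []
  | l :: ls =>
      if pvIsHandStart l then 0 :: (pvNB ls).map (· + 1) else (pvNB ls).map (· + 1)

theorem pvStepA_eq (st : List String × List String × Bool) (line : String) :
    pvStepA st line =
      if pvIsHandStart line then
        ((if !st.2.1.isEmpty && st.2.2 then st.1 ++ [PySem.Str.join "\n" st.2.1] else st.1),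
         [line], true)
      else if st.2.2 then (st.1, st.2.1 ++ [line], st.2.2) else st := rfl

theorem pvStepA_pos (blocks cur : List String) (inh : Bool) (l : String)
    (h : pvIsHandStart l = true) :
    pvStepA (blocks, cur, inh) l
      = ((if !cur.isEmpty && inh then blocks ++ [PySem.Str.join "\n" cur] else blocks),
         [l], true) := by
  simp [pvStepA_eq, h]

theorem pvStepA_neg (blocks cur : List String) (inh : Bool) (l : String)
    (h : pvIsHandStart l = false) :
    pvStepA (blocks, cur, inh) l
      = if inh then (blocks, cur ++ [l], inh) else (blocks, cur, inh) := by
  simp [pvStepA_eq, h]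

theorem pvNonempty_flag (cur : List String) (hc : cur ≠ []) :
    (!cur.isEmpty && true) = true := by
  cases cur with
  | nil => exact absurd rfl hc
  | cons a t => rfl

-- A's loop, once in a hand with nonempty current block
theorem pvA_run (ls : List String) : ∀ (blocks cur : List String), cur ≠ [] →
    pvFinish (ls.foldl pvStepA (blocks, cur, true))
      = blocks ++ PySem.Str.join "\n" (cur ++ (pvGroups ls).1)
          :: (pvGroups ls).2.map (PySem.Str.join "\n") := by
  induction ls with
  | nil =>
      intro blocks cur hc
      simp [pvFinish, pvGroups, pvNonempty_flag cur hc]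
  | cons l ls ih =>
      intro blocks cur hc
      rw [List.foldl_cons]
      cases hb : pvIsHandStart l with
      | true =>
          rw [pvStepA_pos blocks cur true l hb, pvNonempty_flag cur hc, if_pos rfl]
          rw [ih (blocks ++ [PySem.Str.join "\n" cur]) [l] (by simp)]
          simp [pvGroups, hb]
      | false =>
          rw [pvStepA_neg blocks cur true l hb, if_pos rfl]
          rw [ih blocks (cur ++ [l]) (by simp)]
          simp [pvGroups, hb]

-- A's loop from the start (before the first boundary)
theorem pvA_start (ls : List String) :
    pvFinish (ls.foldl pvStepA ([], [], false))
      = (pvGroups ls).2.map (PySem.Str.join "\n") := by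
  induction ls with
  | nil => simp [pvFinish, pvGroups]
  | cons l ls ih =>
      rw [List.foldl_cons]
      cases hb : pvIsHandStart l with
      | true =>
          rw [pvStepA_pos [] [] false l hb]
          rw [show (!([] : List String).isEmpty && false) = false from rfl, if_neg (by simp)]
          rw [pvA_run ls [] [l] (by simp)]
          simp [pvGroups, hb]
      | false =>
          rw [pvStepA_neg [] [] false l hb, if_neg (by simp), ih]
          simp [pvGroups, hb]

-- pending characterisation via pvNB
theorem pvNB_pending (ls : List String) :
    (pvNB ls = [] → (pvGroups ls).1 = ls ∧ (pvGroups ls).2 = []) ∧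
    (∀ b rest, pvNB ls = b :: rest → ls.take b = (pvGroups ls).1) := by
  induction ls with
  | nil => simp [pvNB, pvGroups]
  | cons l ls ih =>
      cases hb : pvIsHandStart l with
      | true =>
          refine ⟨by simp [pvNB, hb], ?_⟩
          intro b rest h
          simp only [pvNB, hb, if_true, List.cons.injEq] at h
          simp [pvGroups, hb, ← h.1]
      | false =>
          constructor
          · intro h
            simp only [pvNB, hb, Bool.false_eq_true, if_false, List.map_eq_nil_iff] at h
            simp [pvGroups, hb, (ih.1 h).1, (ih.1 h).2]
          · intro b rest h
            simp only [pvNB, hb, Bool.false_eq_true, if_false] at h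
            cases hn : pvNB ls with
            | nil => rw [hn] at h; simp at h
            | cons b' r' =>
                rw [hn, List.map_cons] at h
                simp only [List.cons.injEq] at h
                have hp := ih.2 b' r' hn
                rw [← h.1]
                simp [pvGroups, hb, List.take_succ_cons, hp]

-- the boundary-index comprehension computes pvNB shifted by the start
theorem pvEnum_filterMap (ls : List String) : ∀ (s : Int),
    (PySem.List.enumerate ls s).filterMap
        (fun p => if pvIsHandStart p.2 then some p.1 else none)
      = (pvNB ls).map (fun n : Nat => s + (n : Int)) := by
  induction ls with
  | nil => intro s; simp [PySem.List.enumerate_nil, pvNB]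
  | cons l ls ih =>
      intro s
      rw [PySem.List.enumerate_cons]
      have hmap : ((pvNB ls).map (· + 1)).map (fun n : Nat => s + (n : Int))
          = (pvNB ls).map (fun n : Nat => (s + 1) + (n : Int)) := by
        rw [List.map_map]
        apply List.map_congr_left
        intro n _
        simp only [Function.comp_apply]
        push_cast
        ring
      cases hb : pvIsHandStart l with
      | true =>
          have hstep : List.filterMap (fun p : Int × String => if pvIsHandStart p.2 = true then some p.1 else none) ((s, l) :: PySem.List.enumerate ls (s + 1)) = s :: List.filterMap (fun p : Int × String => if pvIsHandStart p.2 = true then some p.1 else none) (PySem.List.enumerate ls (s + 1)) := by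
            simp [hb]
          rw [hstep, ih (s + 1)]
          simp only [pvNB, hb, if_true, List.map_cons, hmap]
          simp
      | false =>
          rw [List.filterMap_cons_none (by simp [hb]), ih (s + 1)]
          simp only [pvNB, hb, Bool.false_eq_true, if_false, hmap]

-- shifting the index table by one drops the head line from all slices
theorem pvShift (ls : List String) (l : String)
    (h : ((pvNB ls).zip ((pvNB ls).tail ++ [ls.length])).map
          (fun be => (ls.drop be.1).take (be.2 - be.1)) = (pvGroups ls).2) :
    ((((pvNB ls).map (· + 1))).zip (((pvNB ls).map (· + 1)).tail ++ [ls.length + 1])).map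
        (fun be => ((l :: ls).drop be.1).take (be.2 - be.1)) = (pvGroups ls).2 := by
  have hM : ((pvNB ls).map (· + 1)).tail ++ [ls.length + 1]
      = ((pvNB ls).tail ++ [ls.length]).map (· + 1) := by
    rw [← List.map_tail, List.map_append]
    rfl
  rw [hM, List.zip_map, List.map_map, ← h]
  apply List.map_congr_left
  intro be _
  simp [List.drop_succ_cons, Nat.add_sub_add_right]

-- B's Nat-level core equals the reference grouping
theorem pvB_core (ls : List String) :
    ((pvNB ls).zip ((pvNB ls).tail ++ [ls.length])).map
        (fun be => (ls.drop be.1).take (be.2 - be.1)) = (pvGroups ls).2 := by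
  induction ls with
  | nil => simp [pvNB, pvGroups]
  | cons l ls ih =>
      have hshift := pvShift ls l ih
      cases hb : pvIsHandStart l with
      | true =>
          simp only [pvNB, hb, if_true, pvGroups, List.length_cons, List.tail_cons]
          cases hn : pvNB ls with
          | nil =>
              have hp := (pvNB_pending ls).1 hn
              simp [hp.1, hp.2, List.take_of_length_le]
          | cons b1 r =>
              have hp := (pvNB_pending ls).2 b1 r hn
              rw [hn] at hshift
              rw [List.map_cons, List.cons_append, List.zip_cons_cons, List.map_cons]
              refine List.cons_eq_cons.mpr ⟨?_, ?_⟩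
              · simp [List.take_succ_cons, hp]
              · simpa using hshift
      | false =>
          simp only [pvNB, hb, Bool.false_eq_true, if_false, pvGroups, List.length_cons]
          simpa using hshift

-- fold it all together
theorem pvB_eq (content : String) :
    split_into_hand_blocks_py_alt content
      = (pvGroups ((PySem.Str.split? content "\n").getD [])).2.map (PySem.Str.join "\n") := by
  unfold split_into_hand_blocks_py_alt
  set ls := (PySem.Str.split? content "\n").getD [] with hls
  simp only
  rw [pvEnum_filterMap ls 0]
  have h0 : (pvNB ls).map (fun n : Nat => (0 : Int) + (n : Int)) = (pvNB ls).map (fun n : Nat => (n : Int)) := by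
    apply List.map_congr_left; intro n _; simp
  rw [h0]
  have htail : ((pvNB ls).map (fun n : Nat => (n : Int))).tail ++ [(ls.length : Int)]
      = ((pvNB ls).tail ++ [ls.length]).map (fun n : Nat => (n : Int)) := by
    rw [← List.map_tail, List.map_append]
    rfl
  rw [htail, List.zip_map, List.map_map, ← pvB_core ls, List.map_map]
  apply List.map_congr_left
  intro be _
  simp [Function.comp, PySem.List.slice_natCast]

-- ===== VERDICT (by name: the statement is the Claim_ definition above) =====
theorem split_into_hand_blocks_py_spec : Claim_equal_split_into_hand_blocks_py := by
  intro content _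
  show split_into_hand_blocks_py content = split_into_hand_blocks_py_alt content
  rw [pvA_unfold, pvA_start, pvB_eq]
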